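-- pv_equiv track=rewrite | github.com/trpzn/university | redes/tarea1/hamming.py | constructBinList2
-- ===== SOURCE A (Python) =====
-- import math
--
-- def constructBinList2(binaryStream):
--     binOutList = []
--     for digit in str(binaryStream):
--         binOutList.append(int(digit))
--
--     binaryStream = binOutList
--     binOutList = []
--
--     twoPow = 0 #current pow of 2 used
--     currDpos = 0 #current position in dataStream
--     dAmount = 0 #amount of data used
--
--     #while there are items in binary stream
--     while (currDpos<len(binaryStream)):
--         binaryStream[currDpos] = 2
--         currDpos+=1
--         while ((dAmount+1)<int(math.pow(2,twoPow)) and currDpos<len(binaryStream)):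
--             currDpos+=1
--             dAmount+=1
--         twoPow+=1
--         dAmount=0
--     return binaryStream
-- ===== SOURCE B (Python) =====
-- def constructBinList2(binaryStream):
--     digits = [int(d) for d in str(binaryStream)]
--     k = 0
--     while 2 ** k <= len(digits):
--         digits[2 ** k - 1] = 2
--         k += 1
--     return digits
-- ===== Notes on version B (the rewrite author's own statement) =====
-- stated objective: simpler
-- what changed: B marks the power-of-two positions (indices 2^k - 1) directly by doubling a power index, instead of A's nested skip-counting walk that visits every index with inner/outer while loops and mutable twoPow/currDpos/dAmount counters.
import Mathlib
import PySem

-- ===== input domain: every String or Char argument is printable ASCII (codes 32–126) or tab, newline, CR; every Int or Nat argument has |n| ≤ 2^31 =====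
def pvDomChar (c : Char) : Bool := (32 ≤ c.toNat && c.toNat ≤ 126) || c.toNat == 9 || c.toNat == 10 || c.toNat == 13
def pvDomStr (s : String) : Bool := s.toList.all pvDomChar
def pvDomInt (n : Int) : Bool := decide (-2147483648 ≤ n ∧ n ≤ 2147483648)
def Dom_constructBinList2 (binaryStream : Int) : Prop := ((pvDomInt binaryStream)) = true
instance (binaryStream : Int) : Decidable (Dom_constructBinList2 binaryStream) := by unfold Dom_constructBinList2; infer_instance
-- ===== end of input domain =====

-- B marks the power-of-two positions directly by doubling a power index instead of A's
-- nested skip-counting walk over every index (objective: simpler).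

-- ===== PORT A =====

-- int(digit) for a single character of str(n); under Pre_ (n ≥ 0) every character is a
-- decimal digit, so the `.getD 0` default (Python: ValueError) is never reached.
def pvCharInt (c : Char) : Int := (PySem.Int.ofStr? (String.ofList [c])).getD 0

-- inner while loop of A: while (dAmount+1) < int(math.pow(2, twoPow)) and currDpos < len:
--   currDpos += 1; dAmount += 1
-- int(math.pow(2, twoPow)) is ported as 2 ^ twoPow, exact for the exponents reachable here
-- (math.pow is exact on powers of two below 2^53). The fuel argument (2 ^ twoPow at the
-- call site) only makes the recursion structural; it never cuts the loop short.
def cbl2_inner : Nat → Nat → Nat → Nat → Nat → Nat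
  | 0, _, currDpos, _, _ => currDpos
  | fuel + 1, twoPow, currDpos, dAmount, len =>
    if dAmount + 1 < 2 ^ twoPow ∧ currDpos < len then
      cbl2_inner fuel twoPow (currDpos + 1) (dAmount + 1) len
    else currDpos

-- outer while loop of A (binaryStream has been replaced by the digit list bs); currDpos
-- strictly increases each iteration, so fuel = bs.length at the call site never cuts it short.
def cbl2_outer : Nat → List Int → Nat → Nat → List Int
  | 0, bs, _, _ => bs
  | fuel + 1, bs, twoPow, currDpos =>
    if currDpos < bs.length then
      let bs' := bs.set currDpos 2
      cbl2_outer fuel bs' (twoPow + 1) (cbl2_inner (2 ^ twoPow) twoPow (currDpos + 1) 0 bs'.length)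
    else bs

def constructBinList2 (binaryStream : Int) : List Int :=
  -- binOutList = []; for digit in str(binaryStream): binOutList.append(int(digit))
  let binOutList : List Int :=
    (PySem.Int.toStr binaryStream).toList.foldl (fun acc c => acc ++ [pvCharInt c]) []
  cbl2_outer binOutList.length binOutList 0 0

-- ===== PORT B =====

-- while 2 ** k <= len(digits): digits[2 ** k - 1] = 2; k += 1
-- (fuel = len(digits) at the call site is enough iterations; it never cuts the loop short)
def cbl2AltLoop : Nat → Nat → List Int → List Int
  | 0, _, digits => digits
  | fuel + 1, k, digits =>
    if 2 ^ k ≤ digits.length then cbl2AltLoop fuel (k + 1) (digits.set (2 ^ k - 1) 2)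
    else digits

def constructBinList2_alt (binaryStream : Int) : List Int :=
  -- digits = [int(d) for d in str(binaryStream)]
  let digits : List Int := (PySem.Int.toStr binaryStream).toList.map pvCharInt
  cbl2AltLoop digits.length 0 digits

-- ===== PRECONDITION & SPEC =====
-- Pre_ excludes negative inputs: there str(binaryStream) starts with '-' and int('-')
-- raises ValueError in A (and in B).
def Pre_constructBinList2 (binaryStream : Int) : Prop := 0 ≤ binaryStream
instance (binaryStream : Int) : Decidable (Pre_constructBinList2 binaryStream) := by unfold Pre_constructBinList2; infer_instance
def pvWitness_constructBinList2 : Int := (12345)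

def Spec_constructBinList2 (binaryStream : Int) (out : List Int) : Prop := out = constructBinList2_alt binaryStream
instance (binaryStream : Int) (out : List Int) : Decidable (Spec_constructBinList2 binaryStream out) := by unfold Spec_constructBinList2; infer_instance

-- ===== CLAIM (what is proved, stated in full; the proofs are below) =====
def Claim_equal_constructBinList2 : Prop := ∀ (binaryStream : Int), Dom_constructBinList2 binaryStream → Pre_constructBinList2 binaryStream → Spec_constructBinList2 binaryStream (constructBinList2 binaryStream)

-- ===== LEMMAS AND PROOFS =====

theorem foldl_append_eq_map {α β : Type} (f : α → β) :
    ∀ (l : List α) (acc : List β),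
      l.foldl (fun a c => a ++ [f c]) acc = acc ++ l.map f := by
  intro l
  induction l with
  | nil => intro acc; simp
  | cons x xs ih => intro acc; simp [ih]

theorem cbl2_inner_eval (t l : Nat) :
    ∀ fuel c d, 2 ^ t - 1 - d ≤ fuel → c ≤ l →
      cbl2_inner fuel t c d l = min (c + (2 ^ t - 1 - d)) l := by
  intro fuel
  induction fuel with
  | zero =>
    intro c d hn hc
    simp only [cbl2_inner]
    omega
  | succ fuel ih =>
    intro c d hn hc
    have h2 : 1 ≤ 2 ^ t := Nat.one_le_two_pow
    simp only [cbl2_inner]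
    split
    · next hcond =>
      rw [ih (c + 1) (d + 1) (by omega) (by omega)]
      omega
    · next hcond => rcases not_and_or.mp hcond with hh | hh <;> omega

theorem cbl2_main :
    ∀ (fuel fuel' k : Nat) (bs : List Int),
      bs.length - (2 ^ k - 1) ≤ fuel → bs.length + 1 - 2 ^ k ≤ fuel' →
      cbl2_outer fuel bs k (2 ^ k - 1) = cbl2AltLoop fuel' k bs := by
  intro fuel
  induction fuel with
  | zero =>
    intro fuel' k bs h h'
    have h1 : 1 ≤ 2 ^ k := Nat.one_le_two_pow
    cases fuel' with
    | zero => rfl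
    | succ fuel' =>
      simp only [cbl2_outer, cbl2AltLoop]
      rw [if_neg (by omega)]
  | succ fuel ih =>
    intro fuel' k bs h h'
    have h1 : 1 ≤ 2 ^ k := Nat.one_le_two_pow
    have hp : 2 ^ (k + 1) = 2 ^ k * 2 := pow_succ 2 k
    cases fuel' with
    | zero =>
      simp only [cbl2_outer, cbl2AltLoop]
      rw [if_neg (by omega)]
    | succ fuel' =>
      by_cases hk : 2 ^ k ≤ bs.length
      · simp only [cbl2_outer, cbl2AltLoop]
        rw [if_pos (by omega : 2 ^ k - 1 < bs.length), if_pos hk]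
        have he := cbl2_inner_eval k (bs.set (2 ^ k - 1) 2).length (2 ^ k) (2 ^ k - 1 + 1) 0
          (by omega) (by simp only [List.length_set]; omega)
        simp only [List.length_set] at he
        simp only [List.length_set]
        rw [he]
        by_cases hstop : 2 ^ (k + 1) ≤ bs.length
        · have hmin : min (2 ^ k - 1 + 1 + (2 ^ k - 1 - 0)) bs.length = 2 ^ (k + 1) - 1 := by omega
          rw [hmin]
          exact ih fuel' (k + 1) (bs.set (2 ^ k - 1) 2)
            (by simp only [List.length_set]; omega) (by simp only [List.length_set]; omega)
        · have hmin : min (2 ^ k - 1 + 1 + (2 ^ k - 1 - 0)) bs.length = bs.length := by omega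
          rw [hmin]
          cases fuel <;> cases fuel' <;>
            simp only [cbl2_outer, cbl2AltLoop, List.length_set] <;>
            first
              | rfl
              | rw [if_neg (by omega), if_neg (by omega)]
              | rw [if_neg (by omega)]
      · simp only [cbl2_outer, cbl2AltLoop]
        rw [if_neg (by omega), if_neg hk]

-- ===== VERDICT (by name: the statement is the Claim_ definition above) =====
theorem constructBinList2_spec : Claim_equal_constructBinList2 := by
  intro n _ _
  unfold Spec_constructBinList2 constructBinList2 constructBinList2_alt
  simp only [foldl_append_eq_map, List.nil_append]
  exact cbl2_main _ _ 0 _ (by simp) (by simp)
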